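-- pv_equiv track=rewrite | github.com/aidecentralized/sonar | src/configs/non_iid_clients.py | assign_colab
-- ===== SOURCE A (Python) =====
-- def assign_colab(clients):
--     groups = [3,3,3,4]
--     dict = {}
--     client = 1
--     while client <= clients:
--         for size in groups:
--             group = []
--             for i in range(size):
--                 group.append(client)
--                 client += 1
--             for c in group:
--                 dict[c] = group
--     return dict
-- ===== SOURCE B (Python) =====
-- def assign_colab(clients):
--     # Per-id closed form: client c belongs to round (c-1)//13; its group's span
--     # within the round is determined by (c-1)%13 against boundaries 0,3,6,9,13.
--     rounds = (clients + 12) // 13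
--     d = {}
--     for c in range(1, 13 * rounds + 1):
--         r, off = divmod(c - 1, 13)
--         if off < 3:
--             lo, hi = 0, 3
--         elif off < 6:
--             lo, hi = 3, 6
--         elif off < 9:
--             lo, hi = 6, 9
--         else:
--             lo, hi = 9, 13
--         base = 13 * r
--         d[c] = list(range(base + lo + 1, base + hi + 1))
--     return d
-- ===== Notes on version B (the rewrite author's own statement) =====
-- stated objective: alternative
-- what changed: B maps each client id directly to its group by arithmetic on (id-1) divmod 13 against the fixed boundaries 0/3/6/9/13, in one flat pass over ids, instead of A's stateful while loop that builds groups sequentially with a running counter.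
import Mathlib
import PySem

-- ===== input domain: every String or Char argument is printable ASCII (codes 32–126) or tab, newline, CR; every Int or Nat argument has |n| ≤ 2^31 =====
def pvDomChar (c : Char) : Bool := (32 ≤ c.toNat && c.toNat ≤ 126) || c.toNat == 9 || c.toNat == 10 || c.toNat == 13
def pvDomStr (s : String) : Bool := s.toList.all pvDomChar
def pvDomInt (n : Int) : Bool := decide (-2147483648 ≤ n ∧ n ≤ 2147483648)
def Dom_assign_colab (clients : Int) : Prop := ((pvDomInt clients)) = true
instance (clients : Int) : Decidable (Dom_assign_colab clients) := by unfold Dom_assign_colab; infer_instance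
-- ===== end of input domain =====

-- B replaces A's stateful while loop (running counter, groups built by appending) with one flat
-- pass over ids 1..13*rounds that computes each id's group arithmetically from (id-1) divmod 13;
-- objective: alternative. Only the RETURN value is compared (A shares one list object per group).

-- ===== PORT A =====
-- one iteration of A's while body: for size in [3,3,3,4], build group by appending, then insert
def pvRoundA (st : Int × PySem.Dict Int (List Int)) : Int × PySem.Dict Int (List Int) :=
  [3, 3, 3, 4].foldl
    (fun st (size : Nat) =>
      let gc := (List.range size).foldl (fun (p : List Int × Int) _ => (p.1 ++ [p.2], p.2 + 1)) ([], st.1)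
      (gc.2, gc.1.foldl (fun d c => d.insert c gc.1) st.2))
    st

theorem pvRoundA_fst (st : Int × PySem.Dict Int (List Int)) : (pvRoundA st).1 = st.1 + 13 := by
  simp [pvRoundA, List.range_succ]; ring

def pvLoopA (clients client : Int) (d : PySem.Dict Int (List Int)) : PySem.Dict Int (List Int) :=
  if _h : client ≤ clients then
    pvLoopA clients (pvRoundA (client, d)).1 (pvRoundA (client, d)).2
  else d
termination_by (clients + 1 - client).toNat
decreasing_by simp [pvRoundA_fst]; omega

def assign_colab (clients : Int) : List (Int × List Int) :=
  (pvLoopA clients 1 PySem.Dict.empty).items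

-- ===== PORT B =====
-- B's per-id loop body: group of client c from (c-1) divmod 13 and boundaries 0/3/6/9/13
def pvBodyB (d : PySem.Dict Int (List Int)) (c : Int) : PySem.Dict Int (List Int) :=
  let r := PySem.Int.floordiv (c - 1) 13
  let off := PySem.Int.mod (c - 1) 13
  let lohi : Int × Int :=
    if off < 3 then (0, 3) else if off < 6 then (3, 6) else if off < 9 then (6, 9) else (9, 13)
  let base := 13 * r
  d.insert c (PySem.List.pyRange (base + lohi.1 + 1) (base + lohi.2 + 1) 1)

def assign_colab_alt (clients : Int) : List (Int × List Int) :=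
  let rounds := PySem.Int.floordiv (clients + 12) 13
  ((PySem.List.pyRange 1 (13 * rounds + 1) 1).foldl pvBodyB PySem.Dict.empty).items

-- ===== PRECONDITION & SPEC =====
def Spec_assign_colab (clients : Int) (out : List (Int × List Int)) : Prop := out = assign_colab_alt clients
instance (clients : Int) (out : List (Int × List Int)) : Decidable (Spec_assign_colab clients out) := by unfold Spec_assign_colab; infer_instance

-- ===== CLAIM (what is proved, stated in full; the proofs are below) =====
def Claim_equal_assign_colab : Prop := ∀ (clients : Int), Dom_assign_colab clients → Spec_assign_colab clients (assign_colab clients)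

-- ===== LEMMAS AND PROOFS =====

theorem pvRange3 (a : Int) : PySem.List.pyRange a (a + 3) 1 = [a, a + 1, a + 2] := by
  rw [PySem.List.pyRange_one_cons (by omega), PySem.List.pyRange_one_cons (by omega),
      PySem.List.pyRange_one_cons (by omega), PySem.List.pyRange_one_eq_nil (by omega)]
  norm_num; omega

theorem pvRange4 (a : Int) : PySem.List.pyRange a (a + 4) 1 = [a, a + 1, a + 2, a + 3] := by
  rw [PySem.List.pyRange_one_cons (by omega), PySem.List.pyRange_one_cons (by omega),
      PySem.List.pyRange_one_cons (by omega), PySem.List.pyRange_one_cons (by omega),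
      PySem.List.pyRange_one_eq_nil (by omega)]
  norm_num; omega

-- B's body at an id in round n, expressed explicitly
theorem pvBodyB_eq (n off : Int) (h0 : 0 ≤ off) (h13 : off < 13)
    (d : PySem.Dict Int (List Int)) :
    pvBodyB d (13 * n + 1 + off) =
      d.insert (13 * n + 1 + off)
        (if off < 3 then [13*n+1, 13*n+2, 13*n+3]
         else if off < 6 then [13*n+4, 13*n+5, 13*n+6]
         else if off < 9 then [13*n+7, 13*n+8, 13*n+9]
         else [13*n+10, 13*n+11, 13*n+12, 13*n+13]) := by
  have hdiv : PySem.Int.floordiv (13 * n + 1 + off - 1) 13 = n := by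
    rw [PySem.Int.floordiv_eq_ediv_of_pos (by norm_num)]; omega
  have hmod : PySem.Int.mod (13 * n + 1 + off - 1) 13 = off := by
    rw [PySem.Int.mod_eq_emod_of_pos (by norm_num)]; omega
  simp only [pvBodyB, hdiv, hmod]
  split_ifs with h1 h2 h3
  · rw [show (13*n+0+1 : Int) = 13*n+1 by ring, show (13*n+3+1 : Int) = (13*n+1)+3 by ring, pvRange3]
    ring_nf
  · rw [show (13*n+3+1 : Int) = 13*n+4 by ring, show (13*n+6+1 : Int) = (13*n+4)+3 by ring, pvRange3]
    ring_nf
  · rw [show (13*n+6+1 : Int) = 13*n+7 by ring, show (13*n+9+1 : Int) = (13*n+7)+3 by ring, pvRange3]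
    ring_nf
  · rw [show (13*n+9+1 : Int) = 13*n+10 by ring, show (13*n+13+1 : Int) = (13*n+10)+4 by ring, pvRange4]
    ring_nf

-- one block of B's fold equals one round of A
theorem pvBlock_eq (n : Int) (d : PySem.Dict Int (List Int)) :
    (PySem.List.pyRange (13 * n + 1) (13 * n + 14) 1).foldl pvBodyB d = (pvRoundA (13 * n + 1, d)).2 := by
  have hr : PySem.List.pyRange (13 * n + 1) (13 * n + 14) 1 =
      [13*n+1, 13*n+2, 13*n+3, 13*n+4, 13*n+5, 13*n+6, 13*n+7,
       13*n+8, 13*n+9, 13*n+10, 13*n+11, 13*n+12, 13*n+13] := by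
    have h0 : (13 * n + 14 : Int) = (13*n+1) + 13 := by ring
    rw [h0]
    rw [PySem.List.pyRange_one_cons (by omega)]; rw [PySem.List.pyRange_one_cons (by omega)]
    rw [PySem.List.pyRange_one_cons (by omega)]; rw [PySem.List.pyRange_one_cons (by omega)]
    rw [PySem.List.pyRange_one_cons (by omega)]; rw [PySem.List.pyRange_one_cons (by omega)]
    rw [PySem.List.pyRange_one_cons (by omega)]; rw [PySem.List.pyRange_one_cons (by omega)]
    rw [PySem.List.pyRange_one_cons (by omega)]; rw [PySem.List.pyRange_one_cons (by omega)]
    rw [PySem.List.pyRange_one_cons (by omega)]; rw [PySem.List.pyRange_one_cons (by omega)]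
    rw [PySem.List.pyRange_one_cons (by omega)]; rw [PySem.List.pyRange_one_eq_nil (by omega)]
    ring_nf
  have e1 : ∀ d' : PySem.Dict Int (List Int), pvBodyB d' (13*n+1) = d'.insert (13*n+1) [13*n+1, 13*n+2, 13*n+3] := by
    intro d'
    rw [show (13*n+1 : Int) = 13*n+1+0 by ring]
    rw [pvBodyB_eq n 0 (by norm_num) (by norm_num) d']
    norm_num
  have e2 : ∀ d' : PySem.Dict Int (List Int), pvBodyB d' (13*n+2) = d'.insert (13*n+2) [13*n+1, 13*n+2, 13*n+3] := by
    intro d'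
    rw [show (13*n+2 : Int) = 13*n+1+1 by ring]
    rw [pvBodyB_eq n 1 (by norm_num) (by norm_num) d']
    norm_num
    all_goals ring_nf
  have e3 : ∀ d' : PySem.Dict Int (List Int), pvBodyB d' (13*n+3) = d'.insert (13*n+3) [13*n+1, 13*n+2, 13*n+3] := by
    intro d'
    rw [show (13*n+3 : Int) = 13*n+1+2 by ring]
    rw [pvBodyB_eq n 2 (by norm_num) (by norm_num) d']
    norm_num
    all_goals ring_nf
  have e4 : ∀ d' : PySem.Dict Int (List Int), pvBodyB d' (13*n+4) = d'.insert (13*n+4) [13*n+4, 13*n+5, 13*n+6] := by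
    intro d'
    rw [show (13*n+4 : Int) = 13*n+1+3 by ring]
    rw [pvBodyB_eq n 3 (by norm_num) (by norm_num) d']
    norm_num
    all_goals ring_nf
  have e5 : ∀ d' : PySem.Dict Int (List Int), pvBodyB d' (13*n+5) = d'.insert (13*n+5) [13*n+4, 13*n+5, 13*n+6] := by
    intro d'
    rw [show (13*n+5 : Int) = 13*n+1+4 by ring]
    rw [pvBodyB_eq n 4 (by norm_num) (by norm_num) d']
    norm_num
    all_goals ring_nf
  have e6 : ∀ d' : PySem.Dict Int (List Int), pvBodyB d' (13*n+6) = d'.insert (13*n+6) [13*n+4, 13*n+5, 13*n+6] := by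
    intro d'
    rw [show (13*n+6 : Int) = 13*n+1+5 by ring]
    rw [pvBodyB_eq n 5 (by norm_num) (by norm_num) d']
    norm_num
    all_goals ring_nf
  have e7 : ∀ d' : PySem.Dict Int (List Int), pvBodyB d' (13*n+7) = d'.insert (13*n+7) [13*n+7, 13*n+8, 13*n+9] := by
    intro d'
    rw [show (13*n+7 : Int) = 13*n+1+6 by ring]
    rw [pvBodyB_eq n 6 (by norm_num) (by norm_num) d']
    norm_num
    all_goals ring_nf
  have e8 : ∀ d' : PySem.Dict Int (List Int), pvBodyB d' (13*n+8) = d'.insert (13*n+8) [13*n+7, 13*n+8, 13*n+9] := by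
    intro d'
    rw [show (13*n+8 : Int) = 13*n+1+7 by ring]
    rw [pvBodyB_eq n 7 (by norm_num) (by norm_num) d']
    norm_num
    all_goals ring_nf
  have e9 : ∀ d' : PySem.Dict Int (List Int), pvBodyB d' (13*n+9) = d'.insert (13*n+9) [13*n+7, 13*n+8, 13*n+9] := by
    intro d'
    rw [show (13*n+9 : Int) = 13*n+1+8 by ring]
    rw [pvBodyB_eq n 8 (by norm_num) (by norm_num) d']
    norm_num
    all_goals ring_nf
  have e10 : ∀ d' : PySem.Dict Int (List Int), pvBodyB d' (13*n+10) = d'.insert (13*n+10) [13*n+10, 13*n+11, 13*n+12, 13*n+13] := by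
    intro d'
    rw [show (13*n+10 : Int) = 13*n+1+9 by ring]
    rw [pvBodyB_eq n 9 (by norm_num) (by norm_num) d']
    norm_num
    all_goals ring_nf
  have e11 : ∀ d' : PySem.Dict Int (List Int), pvBodyB d' (13*n+11) = d'.insert (13*n+11) [13*n+10, 13*n+11, 13*n+12, 13*n+13] := by
    intro d'
    rw [show (13*n+11 : Int) = 13*n+1+10 by ring]
    rw [pvBodyB_eq n 10 (by norm_num) (by norm_num) d']
    norm_num
    all_goals ring_nf
  have e12 : ∀ d' : PySem.Dict Int (List Int), pvBodyB d' (13*n+12) = d'.insert (13*n+12) [13*n+10, 13*n+11, 13*n+12, 13*n+13] := by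
    intro d'
    rw [show (13*n+12 : Int) = 13*n+1+11 by ring]
    rw [pvBodyB_eq n 11 (by norm_num) (by norm_num) d']
    norm_num
    all_goals ring_nf
  have e13 : ∀ d' : PySem.Dict Int (List Int), pvBodyB d' (13*n+13) = d'.insert (13*n+13) [13*n+10, 13*n+11, 13*n+12, 13*n+13] := by
    intro d'
    rw [show (13*n+13 : Int) = 13*n+1+12 by ring]
    rw [pvBodyB_eq n 12 (by norm_num) (by norm_num) d']
    norm_num
    all_goals ring_nf
  rw [hr]
  simp only [List.foldl, e1, e2, e3, e4, e5, e6, e7, e8, e9, e10, e11, e12, e13]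
  simp [pvRoundA, List.range_succ]
  ring_nf

theorem pvIter_fst (m : Nat) (d : PySem.Dict Int (List Int)) :
    (pvRoundA^[m] (1, d)).1 = 13 * m + 1 := by
  induction m with
  | zero => simp
  | succ m ih => rw [Function.iterate_succ_apply', pvRoundA_fst, ih]; push_cast; ring

theorem pvLoopA_eq (clients : Int) : ∀ (n : Nat) (client : Int) (d : PySem.Dict Int (List Int)),
    (PySem.Int.floordiv (clients - client) 13 + 1).toNat = n →
    pvLoopA clients client d = (pvRoundA^[n] (client, d)).2 := by
  intro n
  induction n with
  | zero =>
    intro client d hn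
    rw [PySem.Int.floordiv_eq_ediv_of_pos (by norm_num)] at hn
    rw [pvLoopA, dif_neg (by omega)]
    rfl
  | succ n ih =>
    intro client d hn
    rw [PySem.Int.floordiv_eq_ediv_of_pos (by norm_num)] at hn
    rw [pvLoopA, dif_pos (by omega)]
    rw [ih (pvRoundA (client, d)).1 (pvRoundA (client, d)).2
          (by rw [pvRoundA_fst, PySem.Int.floordiv_eq_ediv_of_pos (by norm_num)]; omega)]
    rw [Function.iterate_succ_apply]

theorem pvFoldB (m : Nat) (d : PySem.Dict Int (List Int)) :
    (PySem.List.pyRange 1 (13 * (m : Int) + 1) 1).foldl pvBodyB d = (pvRoundA^[m] (1, d)).2 := by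
  induction m with
  | zero => rw [PySem.List.pyRange_one_eq_nil (by norm_num)]; rfl
  | succ m ih =>
    have hsplit : PySem.List.pyRange 1 (13 * ((m : Int) + 1) + 1) 1 =
        PySem.List.pyRange 1 (13 * (m : Int) + 1) 1 ++
        PySem.List.pyRange (13 * (m : Int) + 1) (13 * (m : Int) + 14) 1 := by
      rw [show (13 * ((m : Int) + 1) + 1) = 13 * (m : Int) + 14 by ring]
      exact PySem.List.pyRange_one_append 1 (13 * (m : Int) + 1) (13 * (m : Int) + 14)
        (by omega) (by omega)
    push_cast
    rw [hsplit, List.foldl_append, ih, pvBlock_eq]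
    rw [Function.iterate_succ_apply']
    have hp : ((13 * (m : Int) + 1, (pvRoundA^[m] (1, d)).2) : Int × PySem.Dict Int (List Int))
        = pvRoundA^[m] (1, d) := by
      rw [← pvIter_fst m d]
    rw [hp]

-- ===== VERDICT (by name: the statement is the Claim_ definition above) =====
theorem assign_colab_spec : Claim_equal_assign_colab := by
  intro clients _
  simp only [Spec_assign_colab, assign_colab, assign_colab_alt]
  set rounds := PySem.Int.floordiv (clients + 12) 13 with hr
  have hrange : PySem.List.pyRange 1 (13 * rounds + 1) 1 =
      PySem.List.pyRange 1 (13 * (rounds.toNat : Int) + 1) 1 := by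
    by_cases h : 0 ≤ rounds
    · rw [Int.toNat_of_nonneg h]
    · rw [PySem.List.pyRange_one_eq_nil (by omega), PySem.List.pyRange_one_eq_nil (by omega)]
  rw [hrange, pvFoldB]
  rw [pvLoopA_eq clients rounds.toNat 1 PySem.Dict.empty]
  rw [hr, PySem.Int.floordiv_eq_ediv_of_pos (by norm_num),
      PySem.Int.floordiv_eq_ediv_of_pos (by norm_num)]
  omega
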